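-- pv_equiv track=rewrite | github.com/LeeChanghoJJang/Algorithm-Study | 22회차/baekjoon_14462/baekjoon_14462_이창호.py | maximum_crosswalks
-- ===== SOURCE A (Python) =====
-- def can_be_friends(a, b):
--     return abs(a - b) <= 4
--
-- def maximum_crosswalks(n, left_cows, right_cows):
--     dp = [[0] * (n + 1) for _ in range(n + 1)]
--
--     for i in range(1, n + 1):
--         for j in range(1, n + 1):
--             if can_be_friends(left_cows[i - 1], right_cows[j - 1]):
--                 dp[i][j] = dp[i - 1][j - 1] + 1
--             dp[i][j] = max(dp[i][j], dp[i - 1][j], dp[i][j - 1])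
--
--     return dp[n][n]
-- ===== SOURCE B (Python) =====
-- def can_be_friends(a, b):
--     return abs(a - b) <= 4
--
-- def maximum_crosswalks(n, left_cows, right_cows):
--     # Top-down: memoized recursion over prefix lengths instead of filling a table.
--     memo = {}
--
--     def f(i, j):
--         if i == 0 or j == 0:
--             return 0
--         key = (i, j)
--         if key in memo:
--             return memo[key]
--         best = f(i - 1, j)
--         skip_right = f(i, j - 1)
--         if skip_right > best:
--             best = skip_right
--         if can_be_friends(left_cows[i - 1], right_cows[j - 1]):
--             matched = f(i - 1, j - 1) + 1
--             if matched > best: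
--                 best = matched
--         memo[key] = best
--         return best
--
--     return f(n, n)
-- ===== Notes on version B (the rewrite author's own statement) =====
-- stated objective: alternative
-- what changed: Replaces the bottom-up (n+1)x(n+1) table filled by two nested index loops with top-down memoized recursion over prefix lengths: a helper f(i,j) with base case i==0 or j==0, recursing on the skip-left, skip-right and matched subproblems and caching results in a dict keyed by (i,j).
import Mathlib
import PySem

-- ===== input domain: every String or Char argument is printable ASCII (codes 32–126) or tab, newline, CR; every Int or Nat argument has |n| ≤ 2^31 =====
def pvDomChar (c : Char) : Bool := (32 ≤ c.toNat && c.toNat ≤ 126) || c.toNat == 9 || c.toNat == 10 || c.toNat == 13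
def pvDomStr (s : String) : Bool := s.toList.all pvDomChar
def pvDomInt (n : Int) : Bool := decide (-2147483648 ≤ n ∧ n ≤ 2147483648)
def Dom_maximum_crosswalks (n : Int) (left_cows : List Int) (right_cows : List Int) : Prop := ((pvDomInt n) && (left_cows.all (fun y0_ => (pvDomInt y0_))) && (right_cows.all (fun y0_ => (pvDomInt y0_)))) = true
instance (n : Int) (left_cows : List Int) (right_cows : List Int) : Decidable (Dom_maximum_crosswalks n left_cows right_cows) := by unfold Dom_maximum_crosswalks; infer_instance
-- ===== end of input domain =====

-- B replaces A's bottom-up (n+1)×(n+1) table filled by two nested index loops with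
-- top-down memoized recursion over prefix lengths (a dict-cached helper f(i,j)).

-- ===== PORT A =====
def can_be_friends (a : Int) (b : Int) : Bool := decide (|a - b| ≤ 4)

-- dp[i][j] read / write on the nested list; exact for the in-range non-negative
-- indices that Pre_ guarantees the loops use.
def pvGet2 (dp : List (List Int)) (i j : Int) : Int :=
  PySem.List.pyGetD (PySem.List.pyGetD dp i []) j 0

def pvSet2 (dp : List (List Int)) (i j : Int) (v : Int) : List (List Int) :=
  dp.set i.toNat ((dp.getD i.toNat []).set j.toNat v)

-- body of A's inner loop (one j-iteration), transliterated statement by statement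
def pvStepA (left right : List Int) (i : Int) (dp : List (List Int)) (j : Int) : List (List Int) :=
  let dp := if can_be_friends (PySem.List.pyGetD left (i - 1) 0) (PySem.List.pyGetD right (j - 1) 0)
            then pvSet2 dp i j (pvGet2 dp (i - 1) (j - 1) + 1) else dp
  pvSet2 dp i j (max (max (pvGet2 dp i j) (pvGet2 dp (i - 1) j)) (pvGet2 dp i (j - 1)))

def maximum_crosswalks (n : Int) (left_cows : List Int) (right_cows : List Int) : Int :=
  let dp : List (List Int) :=
    (PySem.List.pyRange 0 (n + 1) 1).map (fun _ => List.replicate (n + 1).toNat (0 : Int))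
  let dp := (PySem.List.pyRange 1 (n + 1) 1).foldl (fun dp i =>
      (PySem.List.pyRange 1 (n + 1) 1).foldl (pvStepA left_cows right_cows i) dp) dp
  pvGet2 dp n n

-- ===== PORT B =====
-- f(i, j) of Source B, threading the memo dict through the recursion.  Python's
-- 'if i == 0 or j == 0' is ported as 'i ≤ 0 ∨ j ≤ 0': for negative i/j the Python
-- recursion never returns (outside Pre_); '≤' only makes the port total there.
def pvF (left right : List Int) (fuel : Nat) (i j : Int) (memo : PySem.Dict (Int × Int) Int) :
    Int × PySem.Dict (Int × Int) Int :=
  match fuel with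
  | 0 => (0, memo)   -- never reached: the caller passes fuel > i.toNat + j.toNat
  | fuel + 1 =>
    if i ≤ 0 ∨ j ≤ 0 then (0, memo)
    else
      match memo.get? (i, j) with
      | some v => (v, memo)
      | none =>
        let r1 := pvF left right fuel (i - 1) j memo
        let r2 := pvF left right fuel i (j - 1) r1.2
        let best := if r2.1 > r1.1 then r2.1 else r1.1
        let r3 :=
          if can_be_friends (PySem.List.pyGetD left (i - 1) 0) (PySem.List.pyGetD right (j - 1) 0) then
            let r := pvF left right fuel (i - 1) (j - 1) r2.2
            (if r.1 + 1 > best then r.1 + 1 else best, r.2)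
          else (best, r2.2)
        (r3.1, r3.2.insert (i, j) r3.1)

def maximum_crosswalks_alt (n : Int) (left_cows : List Int) (right_cows : List Int) : Int :=
  (pvF left_cows right_cows (n.toNat + n.toNat + 1) n n PySem.Dict.empty).1

-- ===== PRECONDITION & SPEC =====
-- Pre_ excludes exactly the inputs where A raises IndexError: negative n (dp[n][n] on an
-- empty/short table) and n exceeding either list's length (left_cows[i-1]/right_cows[j-1]).
def Pre_maximum_crosswalks (n : Int) (left_cows : List Int) (right_cows : List Int) : Prop :=
  0 ≤ n ∧ n ≤ (left_cows.length : Int) ∧ n ≤ (right_cows.length : Int)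
instance (n : Int) (left_cows : List Int) (right_cows : List Int) : Decidable (Pre_maximum_crosswalks n left_cows right_cows) := by unfold Pre_maximum_crosswalks; infer_instance

def pvWitness_maximum_crosswalks : Int × List Int × List Int := (2, [1, 2], [5, 6])

def Spec_maximum_crosswalks (n : Int) (left_cows : List Int) (right_cows : List Int) (out : Int) : Prop := out = maximum_crosswalks_alt n left_cows right_cows
instance (n : Int) (left_cows : List Int) (right_cows : List Int) (out : Int) : Decidable (Spec_maximum_crosswalks n left_cows right_cows out) := by unfold Spec_maximum_crosswalks; infer_instance

-- ===== CLAIM (what is proved, stated in full; the proofs are below) =====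
def Claim_equal_maximum_crosswalks : Prop := ∀ (n : Int) (left_cows : List Int) (right_cows : List Int), Dom_maximum_crosswalks n left_cows right_cows → Pre_maximum_crosswalks n left_cows right_cows → Spec_maximum_crosswalks n left_cows right_cows (maximum_crosswalks n left_cows right_cows)

-- ===== LEMMAS AND PROOFS =====

-- the common mathematical value: the LCS-style recurrence on prefix lengths
def pvG (left right : List Int) : Nat → Nat → Int
  | 0, _ => 0
  | _ + 1, 0 => 0
  | a + 1, b + 1 =>
    max (max (if can_be_friends (PySem.List.pyGetD left (a : Int) 0)
                               (PySem.List.pyGetD right (b : Int) 0)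
              then pvG left right a b + 1 else 0)
             (pvG left right a (b + 1)))
        (pvG left right (a + 1) b)

lemma pvG_zero_left (left right : List Int) (b : Nat) : pvG left right 0 b = 0 := by
  cases b <;> simp [pvG]

lemma pvG_zero_right (left right : List Int) (a : Nat) : pvG left right a 0 = 0 := by
  cases a <;> simp [pvG]

lemma pvG_succ (left right : List Int) (a b : Nat) :
    pvG left right (a + 1) (b + 1)
      = max (max (if can_be_friends (PySem.List.pyGetD left (a : Int) 0)
                                    (PySem.List.pyGetD right (b : Int) 0)
                  then pvG left right a b + 1 else 0)
                 (pvG left right a (b + 1)))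
            (pvG left right (a + 1) b) := by
  simp [pvG]

lemma pvG_nonneg (left right : List Int) : ∀ N a b, a + b ≤ N → 0 ≤ pvG left right a b := by
  intro N
  induction N with
  | zero =>
    intro a b h
    obtain ⟨rfl, rfl⟩ : a = 0 ∧ b = 0 := by omega
    simp [pvG_zero_left]
  | succ N ih =>
    intro a b h
    match a, b with
    | 0, b => simp [pvG_zero_left]
    | a + 1, 0 => simp [pvG_zero_right]
    | a + 1, b + 1 =>
      have h1 : 0 ≤ pvG left right a (b + 1) := ih a (b + 1) (by omega)
      calc (0 : Int) ≤ pvG left right a (b + 1) := h1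
        _ ≤ max _ (pvG left right a (b + 1)) := le_max_right _ _
        _ ≤ pvG left right (a + 1) (b + 1) := by rw [pvG_succ]; exact le_max_left _ _

lemma pvSetSelf {α : Type} (l : List α) (i : Nat) (a : α) (h : l[i]? = some a) :
    l.set i a = l := by
  obtain ⟨hi, hv⟩ := List.getElem?_eq_some_iff.mp h
  apply List.ext_getElem?; intro k
  by_cases hk : k = i
  · subst hk; simp [List.getElem?_set_self hi, h]
  · simp [List.getElem?_set_ne (by omega : i ≠ k)]

-- one inner loop: A fills row ii+1 of the table with the pvG values of that row
lemma pvInner_sim (left right : List Int) (m ii : Nat) (dp0 : List (List Int))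
    (hrow : dp0[ii]? = some ((List.range (m + 1)).map (fun j => pvG left right ii j)))
    (hzero : dp0[ii + 1]? = some (List.replicate (m + 1) (0 : Int)))
    (t : Nat) (ht : t ≤ m) :
    ((List.range t).map (fun k : Nat => ((1 : Int) + k))).foldl (pvStepA left right (1 + ii)) dp0
      = dp0.set (ii + 1)
          (((List.range (t + 1)).map (fun j => pvG left right (ii + 1) j))
            ++ List.replicate (m - t) 0) := by
  induction t with
  | zero =>
    have h01 : (((List.range 1).map (fun j => pvG left right (ii + 1) j))
        ++ List.replicate (m - 0) (0 : Int)) = List.replicate (m + 1) 0 := by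
      simp [List.replicate_succ, pvG_zero_right]
    rw [List.range_zero, List.map_nil, List.foldl_nil, h01, pvSetSelf dp0 (ii + 1) _ hzero]
  | succ t ih2 =>
    have hA := ih2 (by omega)
    set prev : List Int := (List.range (m + 1)).map (fun j => pvG left right ii j) with hprev
    set cur : List Int := (List.range (t + 1)).map (fun j => pvG left right (ii + 1) j) with hcur
    have hplen : prev.length = m + 1 := by simp [hprev]
    have hcl : cur.length = t + 1 := by simp [hcur]
    have hii1 : ii + 1 < dp0.length := (List.getElem?_eq_some_iff.mp hzero).1
    have e1 : ((1 : Int) + ↑ii) - 1 = (ii : Int) := by omega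
    have e2 : ((1 : Int) + ↑t) - 1 = (t : Int) := by omega
    have e5 : (1 : Int) + ↑t = ((t + 1 : Nat) : Int) := by push_cast; ring
    have e5i : (1 : Int) + ↑ii = ((ii + 1 : Nat) : Int) := by push_cast; ring
    have hprevD : ∀ k : Nat, k ≤ m → prev.getD k 0 = pvG left right ii k := by
      intro k hk
      rw [hprev, List.getD_eq_getElem?_getD, List.getElem?_map, List.getElem?_range (by omega)]
      rfl
    have hcurD : cur.getD t 0 = pvG left right (ii + 1) t := by
      rw [hcur, List.getD_eq_getElem?_getD, List.getElem?_map, List.getElem?_range (by omega)]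
      rfl
    have hrd1 : (dp0.set (ii + 1) (cur ++ List.replicate (m - t) (0 : Int))).getD ii [] = prev := by
      rw [List.getD_eq_getElem?_getD, List.getElem?_set_ne (by omega : ii + 1 ≠ ii), hrow]; rfl
    have hrd2 : (dp0.set (ii + 1) (cur ++ List.replicate (m - t) (0 : Int))).getD (ii + 1) []
        = cur ++ List.replicate (m - t) (0 : Int) := by
      rw [List.getD_eq_getElem?_getD, List.getElem?_set_self hii1]; rfl
    have hrowlen : (cur ++ List.replicate (m - t) (0 : Int)).length = m + 1 := by
      simp [hcl]; omega
    have hrowt : (cur ++ List.replicate (m - t) (0 : Int)).getD t 0 = cur.getD t 0 := by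
      rw [List.getD_eq_getElem?_getD, List.getElem?_append_left (by omega), ← List.getD_eq_getElem?_getD]
    have hrowt1 : (cur ++ List.replicate (m - t) (0 : Int)).getD (t + 1) 0 = 0 := by
      rw [List.getD_eq_getElem?_getD, List.getElem?_append_right (by omega)]
      simp [hcl, (by omega : t < m)]
    have hsetrow : ∀ v : Int, (cur ++ List.replicate (m - t) (0 : Int)).set (t + 1) v
        = (cur ++ [v]) ++ List.replicate (m - (t + 1)) (0 : Int) := by
      intro v
      have hmt : m - t = (m - (t + 1)) + 1 := by omega
      rw [hmt, List.replicate_succ, List.set_append, if_neg (by omega), hcl]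
      simp
    have hrd1' : ∀ r : List Int, ((dp0.set (ii + 1) (cur ++ List.replicate (m - t) (0 : Int))).set (ii + 1) r).getD ii [] = prev := by
      intro r
      rw [List.getD_eq_getElem?_getD, List.getElem?_set_ne (by omega : ii + 1 ≠ ii),
        List.getElem?_set_ne (by omega : ii + 1 ≠ ii), hrow]; rfl
    have hrd2' : ∀ r : List Int, ((dp0.set (ii + 1) (cur ++ List.replicate (m - t) (0 : Int))).set (ii + 1) r).getD (ii + 1) [] = r := by
      intro r
      rw [List.getD_eq_getElem?_getD, List.getElem?_set_self (by simpa using hii1)]; rfl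
    have hrt1 : ∀ v : Int, ((cur ++ List.replicate (m - t) (0 : Int)).set (t + 1) v).getD (t + 1) 0 = v := by
      intro v
      rw [List.getD_eq_getElem?_getD, List.getElem?_set_self (by omega)]; rfl
    have hrt2 : ∀ v : Int, ((cur ++ List.replicate (m - t) (0 : Int)).set (t + 1) v).getD t 0 = cur.getD t 0 := by
      intro v
      rw [List.getD_eq_getElem?_getD, List.getElem?_set_ne (by omega : t + 1 ≠ t),
        ← List.getD_eq_getElem?_getD, hrowt]
    have hext : (List.range (t + 1 + 1)).map (fun j => pvG left right (ii + 1) j)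
        = cur ++ [pvG left right (ii + 1) (t + 1)] := by
      rw [List.range_succ, List.map_append]; rfl
    have hsplit : (List.range (t + 1)).map (fun k : Nat => ((1 : Int) + k))
        = (List.range t).map (fun k : Nat => ((1 : Int) + k)) ++ [(1 : Int) + t] := by
      rw [List.range_succ, List.map_append]; rfl
    rw [hext, hsplit, List.foldl_append, hA, List.foldl_cons, List.foldl_nil]
    cases hf : can_be_friends (PySem.List.pyGetD left (↑ii : Int) 0) (PySem.List.pyGetD right (↑t : Int) 0) with
    | false =>
      have hAstep : pvStepA left right (1 + ↑ii) (dp0.set (ii + 1) (cur ++ List.replicate (m - t) (0 : Int))) (1 + ↑t)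
          = dp0.set (ii + 1) ((cur ++ List.replicate (m - t) (0 : Int)).set (t + 1)
              (max (max 0 (prev.getD (t + 1) 0)) (cur.getD t 0))) := by
        simp only [pvStepA, e1, e2, hf, Bool.false_eq_true, if_false]
        simp only [pvSet2, pvGet2, e5, e5i, Int.toNat_natCast,
          PySem.List.pyGetD_natCast, hrd1, hrd2, hrowt, hrowt1]
        simp only [List.set_set]
      rw [hAstep, hsetrow]
      have hv : max (max 0 (prev.getD (t + 1) 0)) (cur.getD t 0)
          = pvG left right (ii + 1) (t + 1) := by
        rw [hprevD (t + 1) (by omega), hcurD, pvG, hf]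
        simp
      rw [hv]
    | true =>
      have hAstep : pvStepA left right (1 + ↑ii) (dp0.set (ii + 1) (cur ++ List.replicate (m - t) (0 : Int))) (1 + ↑t)
          = dp0.set (ii + 1) ((cur ++ List.replicate (m - t) (0 : Int)).set (t + 1)
              (max (max (prev.getD t 0 + 1) (prev.getD (t + 1) 0)) (cur.getD t 0))) := by
        simp only [pvStepA, e1, e2, hf, reduceIte]
        simp only [pvSet2, pvGet2, e5, e5i, Int.toNat_natCast,
          PySem.List.pyGetD_natCast, hrd1, hrd2, hrd1', hrd2', hrt1, hrt2]
        simp only [List.set_set]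
      rw [hAstep, hsetrow]
      have hv : max (max (prev.getD t 0 + 1) (prev.getD (t + 1) 0)) (cur.getD t 0)
          = pvG left right (ii + 1) (t + 1) := by
        rw [hprevD t (by omega), hprevD (t + 1) (by omega), hcurD, pvG, hf]
        simp
      rw [hv]

-- the outer loop: after s rows, row s of A's table is the pvG row s, later rows still zero
lemma pvOuter_sim (left right : List Int) (m : Nat) (s : Nat) (hs : s ≤ m) :
    ∃ dp : List (List Int),
      ((List.range s).map (fun k : Nat => ((1 : Int) + k))).foldl (fun dp i =>
          ((List.range m).map (fun k : Nat => ((1 : Int) + k))).foldl (pvStepA left right i) dp)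
        (List.replicate (m + 1) (List.replicate (m + 1) (0 : Int))) = dp
      ∧ dp.length = m + 1
      ∧ dp[s]? = some ((List.range (m + 1)).map (fun j => pvG left right s j))
      ∧ (∀ k, s < k → k ≤ m → dp[k]? = some (List.replicate (m + 1) (0 : Int))) := by
  induction s with
  | zero =>
    refine ⟨List.replicate (m + 1) (List.replicate (m + 1) (0 : Int)), rfl, by simp, ?_, ?_⟩
    · rw [List.getElem?_replicate]
      simp only [if_pos (by omega : 0 < m + 1), Option.some.injEq]
      apply List.ext_getElem <;> simp [pvG_zero_left]
    · intro k hk1 hk2; rw [List.getElem?_replicate]; simp; omega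
  | succ s ih =>
    obtain ⟨dpS, hAs, hdplen, hrow, hrows⟩ := ih (by omega)
    have hzero : dpS[s + 1]? = some (List.replicate (m + 1) (0 : Int)) :=
      hrows (s + 1) (by omega) (by omega)
    have hAin := pvInner_sim left right m s dpS hrow hzero m le_rfl
    refine ⟨dpS.set (s + 1)
        (((List.range (m + 1)).map (fun j => pvG left right (s + 1) j))
          ++ List.replicate (m - m) 0), ?_, by simp [hdplen], ?_, ?_⟩
    · have hsplit : (List.range (s + 1)).map (fun k : Nat => ((1 : Int) + k))
          = (List.range s).map (fun k : Nat => ((1 : Int) + k)) ++ [(1 : Int) + s] := by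
        rw [List.range_succ, List.map_append]; rfl
      rw [hsplit, List.foldl_append, hAs, List.foldl_cons, List.foldl_nil]
      exact hAin
    · rw [List.getElem?_set_self (show s + 1 < dpS.length by omega)]
      simp
    · intro k hk1 hk2
      rw [List.getElem?_set_ne (by omega : s + 1 ≠ k)]
      exact hrows k (by omega) hk2

-- B side: the memo cache only ever holds correct pvG values
def pvInv (left right : List Int) (memo : PySem.Dict (Int × Int) Int) : Prop :=
  ∀ (a b : Nat) (v : Int), memo.get? ((a : Int), (b : Int)) = some v → v = pvG left right a b

lemma pvInv_insert (left right : List Int) (memo : PySem.Dict (Int × Int) Int)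
    (hinv : pvInv left right memo) (a b : Nat) (v : Int) (hv : v = pvG left right a b) :
    pvInv left right (memo.insert ((a : Int), (b : Int)) v) := by
  intro a0 b0 v0 hget
  rw [PySem.Dict.get?_insert] at hget
  split_ifs at hget with heq
  · have ha0 : ((a0 : Int)) = ((a : Int)) := congrArg Prod.fst heq
    have hb0 : ((b0 : Int)) = ((b : Int)) := congrArg Prod.snd heq
    obtain rfl : a0 = a := by exact_mod_cast ha0
    obtain rfl : b0 = b := by exact_mod_cast hb0
    exact (Option.some.inj hget).symm.trans hv
  · exact hinv a0 b0 v0 hget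

lemma pvF_correct (left right : List Int) : ∀ N (a b : Nat), a + b < N →
    ∀ memo, pvInv left right memo →
      (pvF left right N a b memo).1 = pvG left right a b
        ∧ pvInv left right (pvF left right N a b memo).2 := by
  intro N
  induction N with
  | zero => intro a b h memo hinv; omega
  | succ N ih =>
    intro a b h memo hinv
    match a, b with
    | 0, b => simp only [pvF]; simp [pvG_zero_left, hinv]
    | a + 1, 0 => simp only [pvF]; simp [pvG_zero_right, hinv]
    | a + 1, b + 1 =>
      simp only [pvF]
      have hguard : ¬(((a + 1 : Nat) : Int) ≤ 0 ∨ ((b + 1 : Nat) : Int) ≤ 0) := by push_cast; omega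
      rw [if_neg hguard]
      cases hmem : PySem.Dict.get? memo (((a + 1 : Nat) : Int), ((b + 1 : Nat) : Int)) with
      | some v => exact ⟨hinv _ _ _ hmem, hinv⟩
      | none =>
        have ea : ((a + 1 : Nat) : Int) - 1 = ((a : Nat) : Int) := by push_cast; ring
        have eb : ((b + 1 : Nat) : Int) - 1 = ((b : Nat) : Int) := by push_cast; ring
        rw [ea, eb]
        obtain ⟨h1v, h1i⟩ := ih a (b + 1) (by omega) memo hinv
        obtain ⟨h2v, h2i⟩ := ih (a + 1) b (by omega) _ h1i
        have hup : 0 ≤ pvG left right a (b + 1) := pvG_nonneg left right _ a (b + 1) le_rfl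
        have hleft : 0 ≤ pvG left right (a + 1) b := pvG_nonneg left right _ (a + 1) b le_rfl
        cases hf : can_be_friends (PySem.List.pyGetD left ((a : Nat) : Int) 0)
            (PySem.List.pyGetD right ((b : Nat) : Int) 0) with
        | false =>
          simp only [Bool.false_eq_true, if_false]
          have hval : (if (pvF left right N (↑(a + 1)) (↑b) (pvF left right N ↑a (↑(b + 1)) memo).2).1
                  > (pvF left right N ↑a (↑(b + 1)) memo).1
                then (pvF left right N (↑(a + 1)) (↑b) (pvF left right N ↑a (↑(b + 1)) memo).2).1
                else (pvF left right N ↑a (↑(b + 1)) memo).1) = pvG left right (a + 1) (b + 1) := by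
            rw [h1v, h2v, pvG_succ, hf]
            simp only [Bool.false_eq_true, if_false]
            rw [Int.max_def, Int.max_def]
            split_ifs <;> omega
          exact ⟨hval, pvInv_insert left right _ h2i (a + 1) (b + 1) _ hval⟩
        | true =>
          simp only [if_true]
          obtain ⟨h3v, h3i⟩ := ih a b (by omega) _ h2i
          have hdiag : 0 ≤ pvG left right a b := pvG_nonneg left right _ a b le_rfl
          have hval : (if (pvF left right N ↑a ↑b (pvF left right N (↑(a + 1)) ↑b (pvF left right N ↑a (↑(b + 1)) memo).2).2).1 + 1
                  > (if (pvF left right N (↑(a + 1)) ↑b (pvF left right N ↑a (↑(b + 1)) memo).2).1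
                        > (pvF left right N ↑a (↑(b + 1)) memo).1
                     then (pvF left right N (↑(a + 1)) ↑b (pvF left right N ↑a (↑(b + 1)) memo).2).1
                     else (pvF left right N ↑a (↑(b + 1)) memo).1)
                then (pvF left right N ↑a ↑b (pvF left right N (↑(a + 1)) ↑b (pvF left right N ↑a (↑(b + 1)) memo).2).2).1 + 1
                else (if (pvF left right N (↑(a + 1)) ↑b (pvF left right N ↑a (↑(b + 1)) memo).2).1
                        > (pvF left right N ↑a (↑(b + 1)) memo).1
                     then (pvF left right N (↑(a + 1)) ↑b (pvF left right N ↑a (↑(b + 1)) memo).2).1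
                     else (pvF left right N ↑a (↑(b + 1)) memo).1))
              = pvG left right (a + 1) (b + 1) := by
            rw [h1v, h2v, h3v, pvG_succ, hf]
            simp only [if_true]
            rw [Int.max_def, Int.max_def]
            split_ifs <;> omega
          exact ⟨hval, pvInv_insert left right _ h3i (a + 1) (b + 1) _ hval⟩

-- ===== VERDICT (by name: the statement is the Claim_ definition above) =====
theorem maximum_crosswalks_spec : Claim_equal_maximum_crosswalks := by
  intro n left right hdom hpre
  obtain ⟨hn, hl, hr⟩ := hpre
  obtain ⟨m, rfl⟩ : ∃ m : Nat, n = (m : Int) := ⟨n.toNat, (Int.toNat_of_nonneg hn).symm⟩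
  unfold Spec_maximum_crosswalks maximum_crosswalks maximum_crosswalks_alt
  have h1 : ((m : Int) + 1).toNat = m + 1 := by omega
  have h2 : PySem.List.pyRange 1 ((m : Int) + 1) 1
      = (List.range m).map (fun k : Nat => ((1 : Int) + k)) := by
    have hm : ((m : Int) + 1 - 1).toNat = m := by omega
    rw [PySem.List.pyRange_one, hm]
  have h0 : (PySem.List.pyRange 0 ((m : Int) + 1) 1).map
        (fun _ => List.replicate ((m : Int) + 1).toNat (0 : Int))
      = List.replicate (m + 1) (List.replicate (m + 1) (0 : Int)) := by
    have hm : ((m : Int) + 1 - 0).toNat = m + 1 := by omega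
    rw [List.map_const', PySem.List.length_pyRange_one, hm, h1]
  obtain ⟨dp, hA, hdplen, hrow, -⟩ := pvOuter_sim left right m m le_rfl
  dsimp only
  rw [h0, h2, hA]
  have hgetA : pvGet2 dp (m : Int) (m : Int) = pvG left right m m := by
    have hget : dp.getD m [] = (List.range (m + 1)).map (fun j => pvG left right m j) := by
      rw [List.getD_eq_getElem?_getD, hrow]; rfl
    simp only [pvGet2, PySem.List.pyGetD_natCast, hget]
    rw [List.getD_eq_getElem?_getD, List.getElem?_map, List.getElem?_range (by omega)]
    rfl
  have hB : (pvF left right ((m : Int).toNat + (m : Int).toNat + 1) (m : Int) (m : Int) PySem.Dict.empty).1 = pvG left right m m := by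
    have hinv : pvInv left right PySem.Dict.empty := by
      intro a b v hget
      rw [PySem.Dict.get?_empty] at hget
      exact absurd hget (by simp)
    have h := (pvF_correct left right (m + m + 1) m m (by omega) PySem.Dict.empty hinv).1
    simpa using h
  rw [hgetA, hB]
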